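-- pv_equiv track=rewrite | github.com/maheshmasale/pythonCoding | challenges/findMaxFrmMinSubArr.py | getTotalSwaps
-- ===== SOURCE A (Python) =====
-- def getTotalSwaps(arr):
--     j = 0
--     startVal = arr[0]
--     cnt = 0
--     while j < len(arr):
--         if arr[j] == startVal:
--             j+=1
--         if arr[j] != startVal:
--             break
--     zeroCnt = 0
--     while j< len(arr):
--         if arr[j] == 0:
--             zeroCnt += 1
--         else:
--             if zeroCnt > 0:
--                 cnt = 2*cnt + zeroCnt
--                 zeroCnt = 0
--         j+=1
--
--     return cnt
-- ===== SOURCE B (Python) =====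
-- def getTotalSwaps(arr):
--     start = arr[0]
--     j = 0
--     while arr[j] == start:
--         j += 1
--     rest = arr[j:]
--     # run-length encode rest: list of (value, run length)
--     runs = []
--     i = 0
--     n = len(rest)
--     while i < n:
--         k = i
--         while k < n and rest[k] == rest[i]:
--             k += 1
--         runs.append((rest[i], k - i))
--         i = k
--     # a trailing zero-run contributes nothing: drop it
--     if runs and runs[-1][0] == 0:
--         runs.pop()
--     zeros = [m for v, m in runs if v == 0]
--     cnt = 0
--     for z in zeros:
--         cnt = 2 * cnt + z
--     return cnt
-- ===== Notes on version B (the rewrite author's own statement) =====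
-- stated objective: alternative
-- what changed: A makes one pass flushing cnt = 2*cnt + zeroCnt at each zero-run end; B works in separate stages: run-length encode the suffix after the leading run, drop a trailing zero-run, filter out the zero-run lengths, then fold 2*c + z over that list.
import Mathlib
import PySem

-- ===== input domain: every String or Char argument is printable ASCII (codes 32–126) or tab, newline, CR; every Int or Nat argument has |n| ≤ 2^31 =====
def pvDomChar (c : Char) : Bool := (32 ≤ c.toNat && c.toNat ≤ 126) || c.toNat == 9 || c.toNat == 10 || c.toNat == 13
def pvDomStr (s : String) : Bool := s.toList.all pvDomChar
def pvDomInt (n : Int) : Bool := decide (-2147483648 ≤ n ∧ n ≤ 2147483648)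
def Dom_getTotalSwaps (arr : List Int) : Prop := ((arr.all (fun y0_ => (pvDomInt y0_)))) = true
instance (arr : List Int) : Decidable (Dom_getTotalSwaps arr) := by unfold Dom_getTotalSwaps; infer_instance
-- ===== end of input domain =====

-- B replaces A's single flush-on-nonzero fold by staged passes: run-length encode the
-- suffix, drop a trailing zero-run, filter the zero-run lengths, and fold 2*c+z over them
-- (objective: alternative decomposition, same O(n) cost).

-- ===== PORT A =====
-- A's first while loop; the index j is carried as the suffix arr[j:] (arr.get j = suffix head,
-- j+1 = suffix tail). Where Python indexes past the end (IndexError, excluded by Pre_),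
-- the port reads headD 0 / returns the suffix.
def pvSkipA (s : Int) : List Int → List Int
  | [] => []                                   -- j = len(arr): while condition fails
  | x :: xs =>
      if x = s then
        (if xs.headD 0 ≠ s then xs else pvSkipA s xs)
      else x :: xs                             -- current element ≠ startVal: the break fires

-- one iteration of A's second while loop, state (cnt, zeroCnt)
def pvStepA (st : Int × Int) (x : Int) : Int × Int :=
  if x = 0 then (st.1, st.2 + 1)
  else if st.2 > 0 then (2 * st.1 + st.2, 0) else (st.1, st.2)

def getTotalSwaps (arr : List Int) : Int :=
  ((pvSkipA (arr.headD 0) arr).foldl pvStepA (0, 0)).1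

-- ===== PORT B =====
-- B's skip loop `while arr[j] == start: j += 1` followed by `rest = arr[j:]`, carried as a
-- suffix; where Python runs past the end (IndexError, excluded by Pre_) the port returns [].
def pvDropLead (s : Int) : List Int → List Int
  | [] => []
  | x :: xs => if x = s then pvDropLead s xs else x :: xs

-- B's run-length encoding loop: each outer iteration consumes one maximal run
-- (the inner `while k < n and rest[k] == rest[i]` counts its length)
def pvRuns : List Int → List (Int × Int)
  | [] => []
  | x :: xs =>
      (x, ((xs.takeWhile (· == x)).length : Int) + 1) :: pvRuns (xs.dropWhile (· == x))
  termination_by l => l.length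
  decreasing_by
    have := List.length_dropWhile_le (· == x) xs
    simp only [List.length_cons]
    omega

-- B's `if runs and runs[-1][0] == 0: runs.pop()`
def pvTrim (runs : List (Int × Int)) : List (Int × Int) :=
  match runs.getLast? with
  | some r => if r.1 = 0 then runs.dropLast else runs
  | none => runs

def getTotalSwaps_alt (arr : List Int) : Int :=
  let rest := pvDropLead (arr.headD 0) arr
  let zeros := ((pvTrim (pvRuns rest)).filter (fun r => r.1 = 0)).map Prod.snd
  zeros.foldl (fun c z => 2 * c + z) 0

-- ===== PRECONDITION & SPEC =====
-- Pre_ excludes exactly the inputs on which Python A raises IndexError: the empty list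
-- (reading arr[0]) and arrays whose elements all equal the first element (the skip loop
-- runs past the end). B raises IndexError on exactly the same inputs.
def Pre_getTotalSwaps (arr : List Int) : Prop :=
  arr ≠ [] ∧ ∃ x ∈ arr, x ≠ arr.headD 0
instance (arr : List Int) : Decidable (Pre_getTotalSwaps arr) := by
  unfold Pre_getTotalSwaps; infer_instance

def pvWitness_getTotalSwaps : List Int := [1, 0, 1]

def Spec_getTotalSwaps (arr : List Int) (out : Int) : Prop := out = getTotalSwaps_alt arr
instance (arr : List Int) (out : Int) : Decidable (Spec_getTotalSwaps arr out) := by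
  unfold Spec_getTotalSwaps; infer_instance

-- ===== CLAIM (what is proved, stated in full; the proofs are below) =====
def Claim_equal_getTotalSwaps : Prop :=
  ∀ (arr : List Int), Dom_getTotalSwaps arr → Pre_getTotalSwaps arr →
    Spec_getTotalSwaps arr (getTotalSwaps arr)

-- ===== LEMMAS AND PROOFS =====

-- Both skip loops land on the same suffix (A's extra look-ahead read makes no difference
-- to the returned suffix).
theorem pvSkipA_eq_dropLead (s : Int) (l : List Int) : pvSkipA s l = pvDropLead s l := by
  induction l with
  | nil => rfl
  | cons x xs ih =>
    simp only [pvSkipA, pvDropLead]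
    by_cases hx : x = s
    · simp only [hx]
      cases xs with
      | nil => cases h0 : decide ((0 : Int) ≠ s) <;> simp_all [pvSkipA, pvDropLead]
      | cons y ys =>
        by_cases hy : y = s
        · simpa [hy] using ih
        · simp [pvDropLead, hy]
    · simp [hx]

-- the zero-run lengths of (0^z ++ s) with the trailing zero-run dropped (proof-side helper)
def pvZrw (z : Int) : List Int → List Int
  | [] => []
  | x :: xs =>
      if x = 0 then pvZrw (z + 1) xs
      else if z > 0 then z :: pvZrw 0 xs else pvZrw 0 xs

-- A's fold, continued from state (c, z), is the 2*c+z fold over pvZrw z s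
theorem pvFoldA_eq_zrw (s : List Int) (c z : Int) (hz0 : 0 ≤ z) :
    (s.foldl pvStepA (c, z)).1 = (pvZrw z s).foldl (fun c z => 2 * c + z) c := by
  induction s generalizing c z with
  | nil => rfl
  | cons x xs ih =>
    simp only [List.foldl_cons, pvStepA, pvZrw]
    by_cases hx : x = 0
    · simp only [hx]
      exact ih c (z + 1) (by omega)
    · simp only [hx]
      by_cases hzp : z > 0
      · simp [hzp, ih _ _ (le_refl 0)]
      · have hz : z = 0 := by omega
        subst hz
        simp [ih _ _ (le_refl 0)]

theorem pvZrw_zero_prefix (pfx : List Int) (ys : List Int) (z : Int)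
    (h : ∀ e ∈ pfx, e = 0) :
    pvZrw z (pfx ++ ys) = pvZrw (z + pfx.length) ys := by
  induction pfx generalizing z with
  | nil => simp
  | cons a l ih =>
    have ha : a = 0 := h a (by simp)
    simp only [List.cons_append, pvZrw, ha]
    rw [ih (z + 1) (fun e he => h e (by simp [he]))]
    simp only [if_true]
    have harith : z + 1 + (l.length : Int) = z + ((a :: l).length : Int) := by
      simp only [List.length_cons]
      push_cast
      ring
    rw [harith]
    simp [List.length_cons]

theorem pvZrw_nonzero_prefix (pfx : List Int) (ys : List Int) (v : Int) (hv : v ≠ 0)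
    (h : ∀ e ∈ pfx, e = v) :
    pvZrw 0 (pfx ++ ys) = pvZrw 0 ys := by
  induction pfx with
  | nil => simp
  | cons a l ih =>
    have ha : a = v := h a (by simp)
    have ha0 : a ≠ 0 := by rw [ha]; exact hv
    simp only [List.cons_append, pvZrw, if_neg ha0]
    simpa using ih (fun e he => h e (by simp [he]))

theorem pvTrim_cons (r : Int × Int) (R : List (Int × Int)) (hR : R ≠ []) :
    pvTrim (r :: R) = r :: pvTrim R := by
  cases R with
  | nil => exact absurd rfl hR
  | cons b R' =>
    unfold pvTrim
    rw [List.getLast?_cons_cons]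
    cases hg : (b :: R').getLast? with
    | none => simp at hg
    | some g => by_cases hg0 : g.1 = 0 <;> simp [hg0, List.dropLast_cons_of_ne_nil]

theorem pvRuns_cons (x : Int) (xs : List Int) :
    pvRuns (x :: xs)
      = (x, ((xs.takeWhile (· == x)).length : Int) + 1) :: pvRuns (xs.dropWhile (· == x)) := by
  rw [pvRuns.eq_def]

theorem pvRuns_nil : pvRuns ([] : List Int) = [] := by
  rw [pvRuns.eq_def]

theorem pvRuns_ne_nil (y : Int) (t : List Int) : pvRuns (y :: t) ≠ [] := by
  rw [pvRuns_cons]; simp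

-- B's staged pipeline computes pvZrw 0
theorem pvPipe_eq_zrw (s : List Int) :
    ((pvTrim (pvRuns s)).filter (fun r => r.1 = 0)).map Prod.snd = pvZrw 0 s := by
  induction s using pvRuns.induct with
  | case1 => rw [pvRuns_nil]; rfl
  | case2 x xs ih =>
    have hpfx : ∀ e ∈ xs.takeWhile (· == x), e = x := by
      intro e he
      have := List.mem_takeWhile_imp he
      simpa using this
    have hsplit : x :: xs
        = (x :: xs.takeWhile (· == x)) ++ xs.dropWhile (· == x) := by
      simp [List.takeWhile_append_dropWhile]
    have hall : ∀ v, x = v → ∀ e ∈ x :: xs.takeWhile (· == x), e = v := by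
      intro v hvx e he
      rcases List.mem_cons.mp he with h | h
      · rw [h, hvx]
      · rw [hpfx e h, hvx]
    rw [pvRuns_cons]
    cases hy : xs.dropWhile (· == x) with
    | nil =>
      rw [hy] at hsplit
      rw [pvRuns_nil]
      by_cases hx : x = 0
      · have hz : pvZrw 0 (x :: xs)
            = pvZrw (0 + ((x :: xs.takeWhile (· == x)).length : Int)) [] := by
          rw [hsplit]
          exact pvZrw_zero_prefix _ [] 0 (by
            intro e he; rw [hall x rfl e he, hx])
        rw [hz]
        simp [pvZrw, pvTrim, hx]
      · have hz : pvZrw 0 (x :: xs) = pvZrw 0 [] := by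
          rw [hsplit]
          exact pvZrw_nonzero_prefix _ [] x hx (hall x rfl)
        rw [hz]
        simp [pvZrw, pvTrim, hx]
    | cons y t =>
      rw [hy] at hsplit ih
      have hyx' : y ≠ x := by
        have := List.head?_dropWhile_not (· == x) xs
        rw [hy] at this
        simpa using this
      rw [pvTrim_cons _ _ (pvRuns_ne_nil y t)]
      by_cases hx : x = 0
      · -- a zero-run followed by a non-zero element: its length is emitted
        have hy0 : y ≠ 0 := by rw [hx] at hyx'; exact hyx'
        have hz : pvZrw 0 (x :: xs)
            = pvZrw (0 + ((x :: xs.takeWhile (· == x)).length : Int)) (y :: t) := by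
          rw [hsplit]
          exact pvZrw_zero_prefix _ _ 0 (by
            intro e he; rw [hall x rfl e he, hx])
        have hpos : (0 : Int) + ((x :: xs.takeWhile (· == x)).length : Int) > 0 := by
          simp only [List.length_cons]
          push_cast
          omega
        have hemit : pvZrw ((0 : Int) + ((x :: xs.takeWhile (· == x)).length : Int)) (y :: t)
            = (((xs.takeWhile (· == x)).length : Int) + 1) :: pvZrw 0 t := by
          simp only [pvZrw, if_neg hy0, if_pos hpos]
          congr 1
          simp only [List.length_cons]
          push_cast
          ring
        have hys0 : pvZrw 0 (y :: t) = pvZrw 0 t := by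
          simp [pvZrw, hy0]
        rw [hz, hemit]
        simp only [List.filter_cons, hx, decide_true, if_true, List.map_cons]
        rw [ih, hys0]
      · have hz : pvZrw 0 (x :: xs) = pvZrw 0 (y :: t) := by
          rw [hsplit]
          exact pvZrw_nonzero_prefix _ _ x hx (hall x rfl)
        rw [hz, ← ih]
        simp [hx]

-- ===== VERDICT (by name: the statement is the Claim_ definition above) =====
theorem getTotalSwaps_spec : Claim_equal_getTotalSwaps := by
  intro arr _hdom _hpre
  unfold Spec_getTotalSwaps getTotalSwaps getTotalSwaps_alt
  rw [pvSkipA_eq_dropLead]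
  rw [pvFoldA_eq_zrw _ _ _ (le_refl 0), ← pvPipe_eq_zrw]
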